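-- pv_equiv track=rewrite | github.com/GaryGoh/Assignments | Lab5/peaks.py | peaks
-- ===== SOURCE A (Python) =====
-- def peaks(s):
--     # Empty list
--     if not s:
--         return []
--
--     # Not emtpy list
--     # initialized ascList in order to avoid list index out of range
--     ascList = [s[0]]
--
--     # Similar as insertion sort, but no need to walk though the new list again
--     # Only compare the current element from original list to the latest element from new list
--     # This way can have O(n) = n time consuming
--     for i in s:
--         if i > ascList[-1]:
--             ascList.append(i)
--     return ascList
-- ===== SOURCE B (Python) =====
-- def peaks(s):
--     # Pass 1: prefix-maximum table; Pass 2: collapse runs of equal maxima.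
--     maxima = []
--     m = None
--     for x in s:
--         m = x if m is None else (x if x > m else m)
--         maxima.append(m)
--     return maxima[:1] + [b for a, b in zip(maxima, maxima[1:]) if b != a]
-- ===== Notes on version B (the rewrite author's own statement) =====
-- stated objective: alternative
-- what changed: B computes the full prefix-maximum table in one pass and then collapses consecutive equal maxima with a zip of the table against its own tail, instead of A's single loop that compares each element against the last element appended to the output list.
import Mathlib
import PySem

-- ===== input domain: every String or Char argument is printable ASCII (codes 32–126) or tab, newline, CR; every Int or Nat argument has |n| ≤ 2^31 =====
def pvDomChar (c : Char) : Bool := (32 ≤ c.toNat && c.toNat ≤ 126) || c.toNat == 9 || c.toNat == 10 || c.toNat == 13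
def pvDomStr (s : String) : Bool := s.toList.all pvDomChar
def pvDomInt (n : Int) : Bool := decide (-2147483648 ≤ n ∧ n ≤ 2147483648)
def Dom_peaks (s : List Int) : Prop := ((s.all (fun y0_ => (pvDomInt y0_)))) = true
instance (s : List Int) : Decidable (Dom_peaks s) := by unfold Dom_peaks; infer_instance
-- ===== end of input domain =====

-- B replaces A's single last-appended-value loop by a prefix-maximum table plus a
-- separate run-collapse pass (objective: alternative decomposition, same cost).

-- ===== PORT A =====
-- A: start ascList = [s[0]], then for each i append i when i > ascList[-1].
def peaks (s : List Int) : List Int :=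
  match s with
  | [] => []
  | x :: _ =>
    s.foldl (fun ascList i => if i > ascList.getLast! then ascList ++ [i] else ascList) [x]

-- ===== PORT B =====
-- B: one fold building the prefix-maximum table `maxima` (with Option state for
-- Python's `m = None` seed), then maxima[:1] + [b for a,b in zip(maxima, maxima[1:]) if b != a].
def peaks_alt (s : List Int) : List Int :=
  let maxima :=
    (s.foldl (fun (p : List Int × Option Int) x =>
        let m := match p.2 with
          | none => x
          | some m => if x > m then x else m
        (p.1 ++ [m], some m)) ([], none)).1
  maxima.take 1 ++ ((maxima.zip (maxima.drop 1)).filter (fun p => decide (p.2 ≠ p.1))).map Prod.snd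

-- ===== PRECONDITION & SPEC =====
def Spec_peaks (s : List Int) (out : List Int) : Prop := out = peaks_alt s
instance (s : List Int) (out : List Int) : Decidable (Spec_peaks s out) := by unfold Spec_peaks; infer_instance

-- ===== CLAIM (what is proved, stated in full; the proofs are below) =====
def Claim_equal_peaks : Prop := ∀ (s : List Int), Dom_peaks s → Spec_peaks s (peaks s)

-- ===== LEMMAS AND PROOFS =====

-- reference: the strictly-increasing subsequence emitted after last value m
def pvGo (m : Int) : List Int → List Int
  | [] => []
  | x :: t => if x > m then x :: pvGo x t else pvGo m t

-- reference: prefix maxima after seed m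
def pvPmax (m : Int) : List Int → List Int
  | [] => []
  | x :: t => (if x > m then x else m) :: pvPmax (if x > m then x else m) t

theorem pvA_fold (t : List Int) : ∀ (acc : List Int) (m : Int), acc ≠ [] → acc.getLast! = m →
    t.foldl (fun ascList i => if i > ascList.getLast! then ascList ++ [i] else ascList) acc
      = acc ++ pvGo m t := by
  induction t with
  | nil => intro acc m _ _; simp [pvGo]
  | cons x t ih =>
    intro acc m hne hl
    simp only [List.foldl, pvGo, hl]
    by_cases h : x > m
    · rw [if_pos h, if_pos h, ih (acc ++ [x]) x (by simp) (by simp)]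
      simp
    · rw [if_neg h, if_neg h, ih acc m hne hl]

theorem pvB_fold (t : List Int) : ∀ (pre : List Int) (m : Int),
    (t.foldl (fun (p : List Int × Option Int) x =>
        let m := match p.2 with
          | none => x
          | some m => if x > m then x else m
        (p.1 ++ [m], some m)) (pre, some m)).1 = pre ++ pvPmax m t := by
  induction t with
  | nil => intro pre m; simp [pvPmax]
  | cons x t ih =>
    intro pre m
    simp only [List.foldl, pvPmax]
    rw [ih]
    simp

theorem pvCollapse (t : List Int) : ∀ (m : Int),
    (((m :: pvPmax m t).zip (pvPmax m t)).filter (fun p => decide (p.2 ≠ p.1))).map Prod.snd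
      = pvGo m t := by
  induction t with
  | nil => intro m; simp [pvPmax, pvGo]
  | cons x t ih =>
    intro m
    by_cases h : x > m
    · have hx : x ≠ m := by omega
      simp only [pvPmax, pvGo, if_pos h, List.zip_cons_cons, List.filter_cons,
        decide_eq_true_eq]
      rw [if_pos (by simpa using hx), List.map_cons, ih x]
    · simp only [pvPmax, pvGo, if_neg h, List.zip_cons_cons, List.filter_cons,
        decide_eq_true_eq]
      rw [if_neg (by simp), ih m]

-- B's fold from the initial state ([], none)
theorem pvB_fold0 (x : Int) (t : List Int) :
    ((x :: t).foldl (fun (p : List Int × Option Int) y =>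
        let m := match p.2 with
          | none => y
          | some m => if y > m then y else m
        (p.1 ++ [m], some m)) ([], none)).1 = x :: pvPmax x t := by
  simp only [List.foldl, List.nil_append]
  rw [pvB_fold t [x] x]
  simp

-- ===== VERDICT (by name: the statement is the Claim_ definition above) =====
theorem peaks_spec : Claim_equal_peaks := by
  intro s _
  unfold Spec_peaks peaks peaks_alt
  match s with
  | [] => simp
  | x :: t =>
    simp only [pvB_fold0]
    simp only [List.take_succ_cons, List.take_zero, List.drop_succ_cons, List.drop_zero, pvCollapse]
    have : (x :: t).foldl (fun ascList i => if i > ascList.getLast! then ascList ++ [i] else ascList) [x]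
        = [x] ++ pvGo x t := by
      simp only [List.foldl]
      rw [if_neg (by simp), pvA_fold t [x] x (by simp) (by simp)]
    simpa using this
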